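-- pv_equiv track=rewrite | github.com/SauravSinha76/scaler | class6/sub_array.py | solve
-- ===== SOURCE A (Python) =====
-- def solve(A):
--     n = len(A)
--     count =0
--     ans =0
--     vovels = 'AEIOU'
--     A = A.upper()
--     for i in range(n-1,-1,-1):
--         count +=1
--         if A[i] in vovels:
--             ans += count
--     return ans
-- ===== SOURCE B (Python) =====
-- def solve(A):
--     # Each vowel at index i lies in exactly n-i prefixes A[:k], k=i+1..n,
--     # so the answer is the sum over k of the vowel count of the prefix A[:k].
--     total = 0
--     prefix_vowels = 0
--     for c in A.upper():
--         if c in 'AEIOU':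
--             prefix_vowels += 1
--         total += prefix_vowels
--     return total
-- ===== Notes on version B (the rewrite author's own statement) =====
-- stated objective: alternative
-- what changed: Replaces A's reverse scan that sums distance-from-end for each vowel by a forward accumulation of the running prefix vowel count, using the identity that the answer equals the sum over all prefixes of their vowel counts.
import Mathlib
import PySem

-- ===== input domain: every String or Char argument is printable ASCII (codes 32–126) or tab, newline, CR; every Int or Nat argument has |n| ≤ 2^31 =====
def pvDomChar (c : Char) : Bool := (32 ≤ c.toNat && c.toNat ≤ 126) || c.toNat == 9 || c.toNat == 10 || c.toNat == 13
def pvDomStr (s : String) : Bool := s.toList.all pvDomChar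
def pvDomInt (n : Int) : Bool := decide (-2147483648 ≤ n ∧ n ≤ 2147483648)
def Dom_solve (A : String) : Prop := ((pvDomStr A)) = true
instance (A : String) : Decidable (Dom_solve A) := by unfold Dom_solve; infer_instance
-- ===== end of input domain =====

-- B replaces A's reverse scan (summing distance-from-end per vowel) by a forward
-- accumulation of the running prefix vowel count (answer = sum of vowel counts of all prefixes).

def pvVowels : List Char := ['A', 'E', 'I', 'O', 'U']

-- ===== PORT A =====
def solve (A : String) : Int :=
  let n : Int := (A.toList.length : Int)
  let up := PySem.Chars.upper A.toList
  (((PySem.List.pyRange (n - 1) (-1) (-1)).foldl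
      (fun (st : Int × Int) i =>
        let count := st.1 + 1
        (count, if PySem.List.pyGetD up i ' ' ∈ pvVowels then st.2 + count else st.2))
      (0, 0))).2

-- ===== PORT B =====
def solve_alt (A : String) : Int :=
  ((PySem.Chars.upper A.toList).foldl
      (fun (st : Int × Int) c =>
        let pref := if c ∈ pvVowels then st.1 + 1 else st.1
        (pref, st.2 + pref))
      (0, 0)).2

-- ===== PRECONDITION & SPEC =====
def Spec_solve (A : String) (out : Int) : Prop := out = solve_alt A
instance (A : String) (out : Int) : Decidable (Spec_solve A out) := by unfold Spec_solve; infer_instance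

-- ===== CLAIM (what is proved, stated in full; the proofs are below) =====
def Claim_equal_solve : Prop := ∀ (A : String), Dom_solve A → Spec_solve A (solve A)

-- ===== LEMMAS AND PROOFS =====

-- vowel count of a char list
def pvCnt : List Char → Int
  | [] => 0
  | x :: xs => (if x ∈ pvVowels then 1 else 0) + pvCnt xs

-- sum of (offset-shifted) indices of vowels
def pvWsum : Int → List Char → Int
  | _, [] => 0
  | off, x :: xs => (if x ∈ pvVowels then off else 0) + pvWsum (off + 1) xs

-- sum over all nonempty prefixes of their vowel counts
def pvPsum : List Char → Int
  | [] => 0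
  | x :: xs => ((xs.length : Int) + 1) * (if x ∈ pvVowels then 1 else 0) + pvPsum xs

theorem rd (k : Nat) : PySem.List.pyRange ((k:Int)-1) (-1) (-1) = (List.range k).map (fun (j : Nat) => ((k:Int)-1) - (j:Int)) := by
  simp only [PySem.List.pyRange]
  norm_num
  rcases Nat.eq_zero_or_pos k with h | h
  · subst h; norm_num
  · rw [if_pos (by omega)]
    apply List.map_congr_left
    intro j hj
    ring

theorem pvCnt_concat (v : List Char) (x : Char) :
    pvCnt (v ++ [x]) = pvCnt v + (if x ∈ pvVowels then 1 else 0) := by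
  induction v with
  | nil => simp [pvCnt]
  | cons y ys ih => simp [pvCnt, ih]; ring

theorem pvWsum_concat (v : List Char) (x : Char) : ∀ off : Int,
    pvWsum off (v ++ [x]) = pvWsum off v + (if x ∈ pvVowels then off + v.length else 0) := by
  induction v with
  | nil => intro off; simp [pvWsum]
  | cons y ys ih => intro off; simp [pvWsum, ih (off+1)]; split_ifs <;> ring

theorem pvWsum_shift (v : List Char) : ∀ off : Int,
    pvWsum off v = off * pvCnt v + pvWsum 0 v := by
  induction v with
  | nil => intro off; simp [pvWsum, pvCnt]
  | cons x xs ih =>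
    intro off
    simp only [pvWsum, pvCnt]
    rw [ih (off+1), ih (0+1)]
    split_ifs <;> ring

-- pvPsum equals n*cnt - (sum of vowel indices)
theorem pvPsum_eq (v : List Char) :
    pvPsum v = (v.length : Int) * pvCnt v - pvWsum 0 v := by
  induction v with
  | nil => simp [pvPsum, pvCnt, pvWsum]
  | cons x xs ih =>
    simp only [pvPsum, pvCnt, pvWsum, ih, List.length_cons]
    rw [pvWsum_shift xs (0+1)]
    push_cast
    split_ifs <;> ring

theorem foldB (v : List Char) : ∀ (p t : Int),
    v.foldl
      (fun (st : Int × Int) c =>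
        let pref := if c ∈ pvVowels then st.1 + 1 else st.1
        (pref, st.2 + pref)) (p, t)
    = (p + pvCnt v, t + p * v.length + pvPsum v) := by
  induction v with
  | nil => intro p t; simp [pvCnt, pvPsum]
  | cons x xs ih =>
    intro p t
    simp only [List.foldl_cons]
    split_ifs with h <;>
    · rw [ih]
      simp only [pvCnt, pvPsum, List.length_cons, h, if_pos, Prod.mk.injEq]
      push_cast
      constructor <;> ring

theorem descMap_succ (n : Nat) :
    (List.range (n+1)).map (fun (j : Nat) => (((n+1:Nat):Int)-1) - (j:Int))
    = (n:Int) :: (List.range n).map (fun (j : Nat) => ((n:Int)-1) - (j:Int)) := by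
  rw [List.range_succ_eq_map, List.map_cons, List.map_map]
  push_cast
  congr 1
  · ring
  · apply List.map_congr_left; intro j hj; simp [Function.comp]; ring

theorem foldA (v : List Char) : ∀ (c a : Int),
    ((List.range v.length).map (fun (j : Nat) => ((v.length:Int)-1) - (j:Int))).foldl
      (fun (st : Int × Int) i =>
        let count := st.1 + 1
        (count, if PySem.List.pyGetD v i ' ' ∈ pvVowels then st.2 + count else st.2)) (c, a)
    = (c + v.length, a + ((c + v.length) * pvCnt v - pvWsum 0 v)) := by
  induction v using List.reverseRecOn with
  | nil => intro c a; simp [pvCnt, pvWsum]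
  | append_singleton v x ih =>
    intro c a
    rw [List.length_append, List.length_singleton, descMap_succ, List.foldl_cons]
    simp only []
    have hx : PySem.List.pyGetD (v ++ [x]) ((v.length : Int)) ' ' = x := by
      rw [PySem.List.pyGetD_natCast]
      simp [List.getD_eq_getElem?_getD]
    rw [hx]
    rw [PySem.List.foldl_congr_mem _ _
      (fun (st : Int × Int) i =>
        let count := st.1 + 1
        (count, if PySem.List.pyGetD v i ' ' ∈ pvVowels then st.2 + count else st.2)) _
      (by
        intro acc i hi
        simp only [List.mem_map, List.mem_range] at hi
        obtain ⟨j, hj, rfl⟩ := hi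
        have h0 : (0:Int) ≤ (v.length:Int) - 1 - j := by omega
        have hlt : (((v.length:Int) - 1 - j)).toNat < v.length := by omega
        simp only [PySem.List.pyGetD_of_nonneg _ _ h0, List.getD_eq_getElem?_getD,
          List.getElem?_append_left hlt])]
    rw [ih]
    rw [pvCnt_concat, pvWsum_concat]
    push_cast
    simp only [Prod.mk.injEq]
    split_ifs <;> constructor <;> ring

theorem solve_eq_alt (A : String) : solve A = solve_alt A := by
  simp only [solve, solve_alt]
  have hlen : (PySem.Chars.upper A.toList).length = A.toList.length := by
    simp [PySem.Chars.upper]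
  rw [rd A.toList.length, foldB]
  rw [← hlen, foldA, pvPsum_eq, hlen]
  ring

-- ===== VERDICT (by name: the statement is the Claim_ definition above) =====
theorem solve_spec : Claim_equal_solve := by
  intro A _
  unfold Spec_solve
  exact solve_eq_alt A
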